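-- pv_equiv track=rewrite | github.com/vgaraujov/SentEval | examples/generate_visual_tasks.py | dataset_maxCharacter
-- ===== SOURCE A (Python) =====
-- from typing import Iterable, Union, List, Tuple, Dict, Generator
-- from collections import Counter
--
-- def dataset_maxCharacter(generator: Iterable[str]):
--     for string in generator:
--         counts = Counter(string)
--         for k in list(counts.keys()):
--             if not k.isalpha():
--                 counts.pop(k)
--
--         if len(counts) < 3:  # Sentence consists of spacing/numbers/punctuation, or very few letters, such that counting characters becomes counting length.
--             continue
--
--         first,second = counts.most_common(n=2)
--         if first[1] != second[1]:  # Unique max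
--             yield first[1], string
-- ===== SOURCE B (Python) =====
-- def dataset_maxCharacter(generator):
--     for string in generator:
--         letters = sorted(ch for ch in string if ch.isalpha())
--         runs = []
--         i = 0
--         n = len(letters)
--         while i < n:
--             j = i + 1
--             while j < n and letters[j] == letters[i]:
--                 j += 1
--             runs.append(j - i)
--             i = j
--         if len(runs) < 3:
--             continue
--         best = 0
--         second = 0
--         for r in runs:
--             if r > best:
--                 best, second = r, best
--             elif r > second:
--                 second = r
--         if best > second:
--             yield best, string
-- ===== Notes on version B (the rewrite author's own statement) =====
-- stated objective: alternative
-- what changed: B never builds a frequency table: per string it sorts the alphabetic characters, scans the sorted list once to emit run lengths, and tracks the top-two run lengths in a single accumulator pass, yielding when the number of runs is >= 3 and the best strictly beats the second; A builds a Counter over all characters, pops non-alpha keys, and sorts the counts with most_common(2).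
import Mathlib
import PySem

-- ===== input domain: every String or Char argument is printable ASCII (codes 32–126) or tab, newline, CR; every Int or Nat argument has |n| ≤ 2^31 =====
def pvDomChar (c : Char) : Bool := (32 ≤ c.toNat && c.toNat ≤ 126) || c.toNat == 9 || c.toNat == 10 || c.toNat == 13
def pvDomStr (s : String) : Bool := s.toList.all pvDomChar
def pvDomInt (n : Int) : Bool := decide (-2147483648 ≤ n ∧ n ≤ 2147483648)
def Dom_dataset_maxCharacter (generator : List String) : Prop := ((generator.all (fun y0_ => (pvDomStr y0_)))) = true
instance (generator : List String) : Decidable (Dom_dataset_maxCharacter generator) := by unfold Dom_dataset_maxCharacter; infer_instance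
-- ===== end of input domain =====

-- B replaces A's Counter + pop-filter + most_common(2) with sort-the-letters, a run-length scan,
-- and a single top-two tracking pass (no frequency table); same yielded pairs.
-- ===== PORT A =====
-- per-string body of A's generator loop: the yielded tuples for one string (counts.pop(k) is ported
-- as Dict.erase: the key is present and the popped value is discarded, so erase is exact here;
-- counts.most_common(n=2) is sorted(items, key=itemgetter(1), reverse=True)[:2], matched directly)
def pvAStep (s : String) : List (Int × String) :=
  let counts := PySem.Dict.counter s.toList
  let counts2 := counts.keys.foldl (fun d k => if !(PySem.Chars.isalpha k) then d.erase k else d) counts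
  if counts2.size < 3 then []
  else
    match PySem.List.sorted counts2.items (fun p => p.2) true with
    | first :: second :: _ => if first.2 ≠ second.2 then [(first.2, s)] else []
    | _ => []   -- unreachable: size ≥ 3

def dataset_maxCharacter (generator : List String) : List (Int × String) :=
  generator.foldl (fun acc s => acc ++ pvAStep s) []

-- ===== PORT B =====
-- the inner while-loops of B: run lengths of consecutive equal characters
-- (the inner 'while j < n and letters[j] == letters[i]' is the takeWhile prefix; i jumps to j = dropWhile)
def pvRunLengths (l : List Char) : List Int :=
  match l with
  | [] => []
  | x :: xs => ((xs.takeWhile (· == x)).length + 1 : Int) :: pvRunLengths (xs.dropWhile (· == x))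
termination_by l.length
decreasing_by simpa using Nat.lt_succ_of_le (List.length_dropWhile_le _ _)

-- B's 'for r in runs' top-two tracking loop
def pvTopTwo (rs : List Int) : Int × Int :=
  rs.foldl (fun bs r => if r > bs.1 then (r, bs.1) else if r > bs.2 then (bs.1, r) else bs) (0, 0)

-- per-string body of B's loop
def pvBStep (s : String) : List (Int × String) :=
  let letters := PySem.List.sorted (s.toList.filter PySem.Chars.isalpha) (fun c => c) false
  let runs := pvRunLengths letters
  if runs.length < 3 then []
  else
    let bs := pvTopTwo runs
    if bs.1 > bs.2 then [(bs.1, s)] else []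

def dataset_maxCharacter_alt (generator : List String) : List (Int × String) :=
  generator.flatMap pvBStep

-- ===== PRECONDITION & SPEC =====
def Spec_dataset_maxCharacter (generator : List String) (out : List (Int × String)) : Prop := out = dataset_maxCharacter_alt generator
instance (generator : List String) (out : List (Int × String)) : Decidable (Spec_dataset_maxCharacter generator out) := by unfold Spec_dataset_maxCharacter; infer_instance

-- ===== CLAIM (what is proved, stated in full; the proofs are below) =====
def Claim_equal_dataset_maxCharacter : Prop := ∀ (generator : List String), Dom_dataset_maxCharacter generator → Spec_dataset_maxCharacter generator (dataset_maxCharacter generator)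

-- ===== LEMMAS AND PROOFS =====

-- A's pop-filter loop, item-wise: erasing every key of ks that fails p filters the items list
lemma items_eraseFold (p : Char → Bool) (ks : List Char) (d : PySem.Dict Char Int) :
    (ks.foldl (fun d k => if !(p k) then d.erase k else d) d).items
      = d.items.filter (fun q => p q.1 || !(ks.contains q.1)) := by
  induction ks generalizing d with
  | nil => simp
  | cons k ks ih =>
    simp only [List.foldl_cons]
    by_cases hk : p k
    · rw [if_neg (by simp [hk]), ih]
      apply List.filter_congr
      intro q _
      by_cases hqk : q.1 = k
      · simp [hqk, hk]
      · simp [hqk]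
    · rw [if_pos (by simp [hk]), ih]
      show (PySem.Dict.mk _).items.filter _ = _
      rw [List.filter_filter]
      apply List.filter_congr
      intro q _
      by_cases hqk : q.1 = k
      · simp [hqk, hk]
      · simp [hqk]

-- dedup (Set.ofList) commutes with filter
lemma ofList_filter (p : Char → Bool) (xs : List Char) :
    (PySem.Set.ofList xs).filter p = PySem.Set.ofList (xs.filter p) := by
  induction xs using List.reverseRecOn with
  | nil => simp
  | append_singleton xs x ih =>
    rw [PySem.Set.ofList_append_singleton, PySem.Set.add_eq_ite, List.filter_append]
    by_cases hx : p x
    · simp only [List.filter_singleton, hx, cond_true]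
      rw [PySem.Set.ofList_append_singleton, PySem.Set.add_eq_ite, ← ih]
      by_cases hm : x ∈ PySem.Set.ofList xs
      · rw [if_pos hm, if_pos (List.mem_filter.mpr ⟨hm, hx⟩)]
      · rw [if_neg hm, if_neg (fun hc => hm (List.mem_filter.mp hc).1)]
        rw [List.filter_append]; simp [hx]
    · simp only [List.filter_singleton, hx, cond_false, List.append_nil, ← ih]
      split
      · rfl
      · rw [List.filter_append]; simp [hx]

-- A's filtered Counter is the Counter of the alpha-filtered characters
lemma aDict_eq (xs : List Char) :
    ((PySem.Dict.counter xs).keys.foldl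
        (fun d k => if !(PySem.Chars.isalpha k) then d.erase k else d) (PySem.Dict.counter xs))
      = PySem.Dict.counter (xs.filter PySem.Chars.isalpha) := by
  apply PySem.Dict.ext
  rw [items_eraseFold]
  rw [List.filter_congr (q := fun q => PySem.Chars.isalpha q.1)
        (fun q hq => by
          have hc : q.1 ∈ (PySem.Dict.counter xs).keys := by
            simp only [PySem.Dict.keys]; exact List.mem_map_of_mem hq
          have hm : q.1 ∈ xs := by
            rw [PySem.Dict.keys_counter, PySem.Set.mem_ofList] at hc; exact hc
          simp [hm])]
  rw [PySem.Dict.items_counter, List.filter_map]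
  simp only [Function.comp_def]
  rw [ofList_filter, PySem.Dict.items_counter]
  apply List.map_congr_left
  intro k hk
  rw [PySem.Set.mem_ofList] at hk
  have := (List.mem_filter.mp hk).2
  rw [List.count_filter]
  simp [this]

-- head of the reverse-sorted items is the max value, and strict-unique-max ↔ count of max = 1
lemma sorted_head_max (l : List (Char × Int)) (f g : Char × Int) (t : List (Char × Int))
    (h : PySem.List.sorted l (fun p => p.2) true = f :: g :: t) :
    PySem.List.max? (l.map (fun q => q.2)) (fun v => v) = some f.2
      ∧ ((f.2 ≠ g.2) ↔ (l.map (fun q => q.2)).count f.2 = 1) := by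
  have hperm : (f :: g :: t).Perm l := by rw [← h]; exact PySem.List.sorted_perm l _ true
  have hmax : ∀ y ∈ l, y.2 ≤ f.2 := PySem.List.key_head_sorted_rev_ge l _ h
  have hpair := PySem.List.sorted_pairwise_rev l (fun p => p.2)
  rw [h] at hpair
  rw [List.pairwise_cons] at hpair
  obtain ⟨hf, hpair2⟩ := hpair
  rw [List.pairwise_cons] at hpair2
  obtain ⟨hg, _⟩ := hpair2
  constructor
  · have hne : l.map (fun q => q.2) ≠ [] := by
      intro hc
      have : l = [] := by simpa using hc
      subst this
      exact absurd hperm.length_eq (by simp)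
    obtain ⟨m, hm⟩ : ∃ m, PySem.List.max? (l.map (fun q => q.2)) (fun v => v) = some m := by
      rcases hmm : PySem.List.max? (l.map (fun q => q.2)) (fun v => v) with _ | m
      · exact absurd ((PySem.List.max?_eq_none_iff _ _).mp hmm) hne
      · exact ⟨m, hmm⟩
    have hmem := PySem.List.max?_mem hm
    obtain ⟨y, hy, hym⟩ := List.mem_map.mp hmem
    have h1 : m ≤ f.2 := hym ▸ hmax y hy
    have hfl : f ∈ l := hperm.subset (List.mem_cons_self ..)
    have h2 : f.2 ≤ m := PySem.List.max?_isMax hm f.2 (List.mem_map.mpr ⟨f, hfl, rfl⟩)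
    rw [hm, le_antisymm h1 h2]
  · have hcnt : (l.map (fun q => q.2)).count f.2
        = ((f :: g :: t).map (fun q => q.2)).count f.2 := ((hperm.map _).count_eq _).symm
    rw [hcnt]
    simp only [List.map_cons, List.count_cons]
    constructor
    · intro hne
      have hg' : g.2 ≠ f.2 := fun hc => hne hc.symm
      have ht0 : (t.map (fun q => q.2)).count f.2 = 0 := by
        rw [List.count_eq_zero]
        intro hc
        obtain ⟨y, hy, hyv⟩ := List.mem_map.mp hc
        have := hg y hy
        have hgf := hf g (List.mem_cons_self ..)
        omega
      simp [ht0, hg']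
    · intro hcount hfg
      rw [hfg] at hcount
      simp at hcount

-- x does not survive dropWhile (== x) on an ordered tail
lemma not_mem_dropWhile_beq (x : Char) (t : List Char)
    (hlo : ∀ y ∈ t, x ≤ y) (hp : t.Pairwise (· ≤ ·)) : x ∉ t.dropWhile (· == x) := by
  induction t with
  | nil => simp
  | cons y t' ih =>
    rw [List.pairwise_cons] at hp
    rw [List.dropWhile_cons]
    by_cases hy : (y == x) = true
    · rw [if_pos hy]
      exact ih (fun z hz => hlo z (List.mem_cons_of_mem _ hz)) hp.2
    · rw [if_neg hy]
      intro hmem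
      rcases List.mem_cons.mp hmem with h | h
      · exact hy (by simp [h])
      · have h1 : y ≤ x := hp.1 x h
        have h2 : x ≤ y := hlo y (List.mem_cons_self ..)
        exact hy (by simp [le_antisymm h1 h2])

-- run lengths of an ordered list: the multiset of letter counts
lemma runLengths_perm (l : List Char) (h : l.Pairwise (· ≤ ·)) :
    (pvRunLengths l).Perm ((PySem.Set.ofList l).map (fun k => (l.count k : Int))) := by
  induction l using pvRunLengths.induct with
  | case1 => simp [pvRunLengths]
  | case2 x xs ih =>
    rw [List.pairwise_cons] at h
    obtain ⟨hx, hxs⟩ := h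
    have hab : xs.takeWhile (· == x) ++ xs.dropWhile (· == x) = xs :=
      List.takeWhile_append_dropWhile
    have haeq : ∀ y ∈ xs.takeWhile (· == x), y = x := fun y hy => by
      have := List.mem_takeWhile_imp hy; simpa using this
    have hxb : x ∉ xs.dropWhile (· == x) := not_mem_dropWhile_beq x xs hx hxs
    have hbpair : (xs.dropWhile (· == x)).Pairwise (· ≤ ·) :=
      List.Pairwise.sublist (List.dropWhile_sublist _) hxs
    have hca : (xs.takeWhile (· == x)).count x = (xs.takeWhile (· == x)).length :=
      List.count_eq_length.mpr (fun y hy => (haeq y hy).symm)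
    have hcx : (x :: xs).count x = (xs.takeWhile (· == x)).length + 1 := by
      have h2 : xs.count x = (xs.takeWhile (· == x)).length := by
        conv_lhs => rw [← hab]
        rw [List.count_append, hca, List.count_eq_zero.mpr hxb]
        simp
      rw [List.count_cons_self, h2]
    have hnodup2 : (x :: PySem.Set.ofList (xs.dropWhile (· == x))).Nodup := by
      simp [List.nodup_cons, PySem.Set.mem_ofList, hxb, PySem.Set.nodup_ofList]
    have hmem_iff : ∀ y, y ∈ x :: xs ↔ y = x ∨ y ∈ xs.dropWhile (· == x) := by
      intro y
      constructor
      · intro hy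
        rcases List.mem_cons.mp hy with h | h
        · exact Or.inl h
        · rw [← hab] at h
          rcases List.mem_append.mp h with h | h
          · exact Or.inl (haeq y h)
          · exact Or.inr h
      · intro hy
        rcases hy with h | h
        · exact h ▸ List.mem_cons_self ..
        · exact List.mem_cons_of_mem _ (by rw [← hab]; exact List.mem_append_right _ h)
    have hperm_sets : (PySem.Set.ofList (x :: xs)).Perm
        (x :: PySem.Set.ofList (xs.dropWhile (· == x))) :=
      (List.perm_ext_iff_of_nodup (PySem.Set.nodup_ofList _) hnodup2).mpr (fun y => by
        rw [PySem.Set.mem_ofList, hmem_iff y, List.mem_cons, PySem.Set.mem_ofList])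
    have hcount_b : ∀ k ∈ PySem.Set.ofList (xs.dropWhile (· == x)),
        ((x :: xs).count k : Int) = ((xs.dropWhile (· == x)).count k : Int) := by
      intro k hk
      have hkb : k ∈ xs.dropWhile (· == x) := (PySem.Set.mem_ofList _ _).mp hk
      have hkx : k ≠ x := fun hc => hxb (hc ▸ hkb)
      have hka : k ∉ xs.takeWhile (· == x) := fun hc => hkx (haeq k hc)
      have hkk : List.count k (x :: xs) = List.count k xs := by
        simp [Ne.symm hkx]
      have hkxs : List.count k xs = List.count k (xs.dropWhile (· == x)) := by
        conv_lhs => rw [← hab]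
        rw [List.count_append, List.count_eq_zero.mpr hka]
        omega
      rw [hkk, hkxs]
    rw [pvRunLengths]
    refine List.Perm.trans ?_ ((hperm_sets.map _).symm)
    rw [List.map_cons]
    have hhead : ((xs.takeWhile (· == x)).length + 1 : Int) = ((x :: xs).count x : Int) := by
      rw [hcx]; push_cast; ring
    rw [hhead, List.map_congr_left hcount_b]
    exact List.Perm.cons _ (ih hbpair)

-- every run length is positive
lemma one_le_runLengths (l : List Char) : ∀ r ∈ pvRunLengths l, 1 ≤ r := by
  induction l using pvRunLengths.induct with
  | case1 => simp [pvRunLengths]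
  | case2 x xs ih =>
    intro r hr
    rw [pvRunLengths] at hr
    rcases List.mem_cons.mp hr with h | h
    · have : (0:Int) ≤ ((xs.takeWhile (· == x)).length : Int) := Int.natCast_nonneg _
      omega
    · exact ih r h

-- the max-with-0 fold either stays 0 or lands in the list
lemma foldl_max_zero_mem (l : List Int) : l.foldl max 0 = 0 ∨ l.foldl max 0 ∈ l := by
  induction l using List.reverseRecOn with
  | nil => simp
  | append_singleton p r ih =>
    rw [List.foldl_append, List.foldl_cons, List.foldl_nil]
    rcases le_total r (p.foldl max 0) with h | h
    · rw [max_eq_left h]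
      rcases ih with h0 | hm
      · exact Or.inl h0
      · exact Or.inr (List.mem_append_left _ hm)
    · rw [max_eq_right h]
      exact Or.inr (List.mem_append_right _ (by simp))

-- the top-two fold computes (max, max-of-rest)
lemma topTwo_spec (rs : List Int) (hpos : ∀ r ∈ rs, 1 ≤ r) :
    pvTopTwo rs = (rs.foldl max 0, (rs.erase (rs.foldl max 0)).foldl max 0) := by
  induction rs using List.reverseRecOn with
  | nil => simp [pvTopTwo]
  | append_singleton p r ih =>
    have hpos' : ∀ y ∈ p, 1 ≤ y := fun y hy => hpos y (List.mem_append_left _ hy)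
    have hr : (1:Int) ≤ r := hpos r (List.mem_append_right _ (by simp))
    have hub : ∀ y ∈ p, y ≤ p.foldl max 0 := (PySem.List.le_foldl_max p 0).2
    have hstep : pvTopTwo (p ++ [r])
        = (fun bs r => if r > bs.1 then (r, bs.1) else if r > bs.2 then (bs.1, r) else bs)
            (pvTopTwo p) r := by
      simp [pvTopTwo, List.foldl_append]
    have hM : (p ++ [r]).foldl max (0:Int) = max (p.foldl max 0) r := by
      rw [List.foldl_append, List.foldl_cons, List.foldl_nil]
    rw [hstep, ih hpos']
    dsimp only
    by_cases h1 : r > p.foldl max 0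
    · have hnot : r ∉ p := fun hc => absurd (hub r hc) (by omega)
      rw [if_pos h1, hM, max_eq_right (le_of_lt h1),
          List.erase_append_right _ hnot]
      simp
    · rw [not_lt] at h1
      have hbp : p.foldl max 0 ∈ p := by
        rcases foldl_max_zero_mem p with h0 | hm
        · rw [h0] at h1; omega
        · exact hm
      rw [hM, max_eq_left h1, List.erase_append_left _ hbp,
          List.foldl_append, List.foldl_cons, List.foldl_nil]
      by_cases h2 : r > (p.erase (p.foldl max 0)).foldl max 0
      · rw [if_neg (by omega), if_pos h2, max_eq_right (le_of_lt h2)]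
      · rw [not_lt] at h2
        rw [if_neg (by omega), if_neg (by omega), max_eq_left h2]

lemma step_eq (s : String) : pvAStep s = pvBStep s := by
  unfold pvAStep pvBStep
  simp only [aDict_eq]
  set xs := s.toList.filter PySem.Chars.isalpha with hxs
  set d := PySem.Dict.counter xs with hd
  set srt := PySem.List.sorted xs (fun c => c) false with hsrt
  have hvals : d.items.map (fun q => q.2) = (PySem.Set.ofList xs).map (fun k => (xs.count k : Int)) := by
    rw [hd, PySem.Dict.items_counter, List.map_map]
    rfl
  have hsperm : srt.Perm xs := PySem.List.sorted_perm xs _ false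
  have hpair : srt.Pairwise (· ≤ ·) := PySem.List.sorted_pairwise xs (fun c => c)
  have hsets : (PySem.Set.ofList srt).Perm (PySem.Set.ofList xs) :=
    (List.perm_ext_iff_of_nodup (PySem.Set.nodup_ofList _) (PySem.Set.nodup_ofList _)).mpr
      (fun y => by rw [PySem.Set.mem_ofList, PySem.Set.mem_ofList, hsperm.mem_iff])
  have hperm : (pvRunLengths srt).Perm (d.items.map (fun q => q.2)) := by
    rw [hvals]
    refine (runLengths_perm srt hpair).trans ?_
    rw [List.map_congr_left (fun k _ => by rw [hsperm.count_eq k] :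
          ∀ k ∈ PySem.Set.ofList srt, ((srt.count k : Int)) = ((xs.count k : Int)))]
    exact hsets.map _
  have hlenv : (d.items.map (fun q => q.2)).length = d.size := by
    rw [List.length_map]; rfl
  have hlen : (pvRunLengths srt).length = d.size := by rw [hperm.length_eq, hlenv]
  by_cases hsz : d.size < 3
  · rw [if_pos hsz, if_pos (by omega : (pvRunLengths srt).length < 3)]
  · rw [if_neg hsz, if_neg (by omega : ¬ (pvRunLengths srt).length < 3)]
    have hslen : (PySem.List.sorted d.items (fun p => p.2) true).length = d.size :=
      PySem.List.length_sorted ..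
    rcases hs : PySem.List.sorted d.items (fun p => p.2) true with _ | ⟨f, _ | ⟨g, t⟩⟩
    · rw [hs] at hslen; simp at hslen; omega
    · rw [hs] at hslen; simp at hslen; omega
    · obtain ⟨hmax, hiff⟩ := sorted_head_max d.items f g t hs
      have hpos : ∀ r ∈ pvRunLengths srt, 1 ≤ r := one_le_runLengths srt
      rw [topTwo_spec (pvRunLengths srt) hpos]
      -- the fold max over the runs is f.2
      have hf2mem : f.2 ∈ pvRunLengths srt := by
        rw [hperm.mem_iff]
        have hfl : f ∈ d.items := by
          have : (f :: g :: t).Perm d.items := by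
            rw [← hs]; exact PySem.List.sorted_perm d.items _ true
          exact this.subset (List.mem_cons_self ..)
        exact List.mem_map.mpr ⟨f, hfl, rfl⟩
      have hub : ∀ y ∈ pvRunLengths srt, y ≤ f.2 := by
        intro y hy
        exact PySem.List.max?_isMax hmax y (hperm.subset hy)
      have hMf : (pvRunLengths srt).foldl max 0 = f.2 := by
        have hle : f.2 ≤ (pvRunLengths srt).foldl max 0 :=
          (PySem.List.le_foldl_max _ 0).2 f.2 hf2mem
        rcases foldl_max_zero_mem (pvRunLengths srt) with h0 | hm
        · have := hpos f.2 hf2mem; omega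
        · exact le_antisymm (hub _ hm) hle
      rw [hMf]
      dsimp only
      -- strict-unique-max on both sides
      have hcond : (f.2 > (( (pvRunLengths srt).erase f.2).foldl max 0))
          ↔ (d.items.map (fun q => q.2)).count f.2 = 1 := by
        rw [← hperm.count_eq f.2]
        constructor
        · intro hgt
          have h1 : 1 ≤ (pvRunLengths srt).count f.2 := List.count_pos_iff.mpr hf2mem
          by_contra hne
          have h2 : 2 ≤ (pvRunLengths srt).count f.2 := by omega
          have : f.2 ∈ (pvRunLengths srt).erase f.2 := by
            rw [← List.count_pos_iff, List.count_erase_self]; omega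
          have := (PySem.List.le_foldl_max ((pvRunLengths srt).erase f.2) 0).2 f.2 this
          omega
        · intro hcnt
          have hnotin : f.2 ∉ (pvRunLengths srt).erase f.2 := by
            rw [← List.count_pos_iff, List.count_erase_self, hcnt]
            omega
          have hlt : ∀ y ∈ (pvRunLengths srt).erase f.2, y < f.2 := by
            intro y hy
            have hyr : y ∈ pvRunLengths srt := (List.erase_sublist ..).mem hy
            have := hub y hyr
            rcases lt_or_eq_of_le this with h | h
            · exact h
            · exact absurd (h ▸ hy) hnotin
          rcases foldl_max_zero_mem ((pvRunLengths srt).erase f.2) with h0 | hm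
          · rw [h0]; have := hpos f.2 hf2mem; omega
          · exact hlt _ hm
      by_cases hne : f.2 ≠ g.2
      · rw [if_pos hne, if_pos (by exact hcond.mpr (hiff.mp hne))]
      · rw [not_ne_iff] at hne
        rw [if_neg (by simp [hne]), if_neg (fun hc => by
          have := hiff.mpr (hcond.mp hc); exact this hne)]

-- ===== VERDICT (by name: the statement is the Claim_ definition above) =====
theorem dataset_maxCharacter_spec : Claim_equal_dataset_maxCharacter := by
  intro generator _
  unfold Spec_dataset_maxCharacter dataset_maxCharacter dataset_maxCharacter_alt
  rw [PySem.List.foldl_append_eq_flatMap, List.nil_append,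
      show pvAStep = pvBStep from funext step_eq]
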